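-- pv_equiv track=rewrite | github.com/alanmcruickshank/adventofcode | 2019/012-n-body.py | step_1d
-- ===== SOURCE A (Python) =====
-- class Vector(object):
--     def __init__(self, x, y, z):
--         self.x = x
--         self.y = y
--         self.z = z
--
--     def __add__(self, other):
--         return self.__class__(
--             x=self.x + other.x,
--             y=self.y + other.y,
--             z=self.z + other.z)
--
--     @staticmethod
--     def unit_diff(a, b):
--         """Compares b & a. Returns 1 if b < a."""
--         if b < a:
--             return 1
--         elif b > a:
--             return -1
--         else:
--             return 0
--
--     def grav_diff(self, other):
--         return self.__class__(
--             self.unit_diff(other.x, self.x),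
--             self.unit_diff(other.y, self.y),
--             self.unit_diff(other.z, self.z)
--         )
--
--     def __str__(self):
--         return "<Vector: x:{0}, y:{1}, z:{2}>".format(
--             self.x, self.y, self.z
--         )
--
--     def energy(self):
--         return abs(self.x) + abs(self.y) + abs(self.z)
--
--     def to_tuple(self):
--         return (self.x, self.y, self.z)
--
--     def __getitem__(self, val):
--         return (self.x, self.y, self.z)[val]
--
-- def step_1d(world):
--     world_buffer = []
--     # Apply Gravity, then velocity
--     for m in world:
--         # iterate each of the subjects
--         dv = 0
--         for t in world:
--             # iterate each of the references
--             dv += Vector.unit_diff(t[0], m[0])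
--         v = m[1] + dv
--         world_buffer.append((m[0] + v, v))
--     return tuple(world_buffer)
-- ===== SOURCE B (Python) =====
-- def step_1d(world):
--     # Count bodies at each position, then one sorted prefix-sum pass gives,
--     # for every position, how many bodies lie strictly below it.
--     cnt = {}
--     for m in world:
--         cnt[m[0]] = cnt.get(m[0], 0) + 1
--     less = {}
--     acc = 0
--     for p in sorted(cnt):
--         less[p] = acc
--         acc += cnt[p]
--     n = len(world)
--     out = []
--     for x, vel in world:
--         v = vel + n - 2 * less[x] - cnt[x]
--         out.append((x + v, v))
--     return tuple(out)
-- ===== Notes on version B (the rewrite author's own statement) =====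
-- stated objective: faster
-- what changed: A sums sign(t.x - m.x) over all pairs (O(n^2)); B counts bodies per position in a dict, makes one prefix-sum pass over the sorted distinct positions to get how many bodies lie strictly below each position, then computes each body's velocity change as n - 2*less[x] - cnt[x] in O(1).
import Mathlib
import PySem

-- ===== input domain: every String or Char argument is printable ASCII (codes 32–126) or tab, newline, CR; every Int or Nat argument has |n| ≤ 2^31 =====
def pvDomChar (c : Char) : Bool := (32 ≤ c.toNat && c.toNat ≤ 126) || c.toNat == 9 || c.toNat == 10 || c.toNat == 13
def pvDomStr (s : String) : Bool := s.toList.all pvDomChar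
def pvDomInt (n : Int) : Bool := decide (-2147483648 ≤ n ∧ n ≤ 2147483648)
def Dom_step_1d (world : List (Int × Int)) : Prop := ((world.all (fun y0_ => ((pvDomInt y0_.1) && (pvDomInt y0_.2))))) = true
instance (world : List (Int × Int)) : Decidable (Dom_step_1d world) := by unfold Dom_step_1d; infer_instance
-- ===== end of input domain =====

-- B replaces A's quadratic all-pairs gravity scan by a position counter and one
-- prefix-sum pass over the sorted distinct positions (objective: faster).

-- ===== PORT A =====
-- Vector.unit_diff(a, b): 1 if b < a, -1 if b > a, else 0
def pvUnitDiff (a b : Int) : Int := if b < a then 1 else if b > a then -1 else 0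

def step_1d (world : List (Int × Int)) : List (Int × Int) :=
  world.foldl (fun world_buffer m =>
    let dv := world.foldl (fun dv t => dv + pvUnitDiff t.1 m.1) 0
    let v := m.2 + dv
    world_buffer ++ [(m.1 + v, v)]) []

-- ===== PORT B =====
def step_1d_alt (world : List (Int × Int)) : List (Int × Int) :=
  let cnt : PySem.Dict Int Int :=
    world.foldl (fun d m => d.insert m.1 (d.getD m.1 0 + 1)) PySem.Dict.empty
  let less := ((PySem.List.sorted cnt.keys (fun x => x) false).foldl
    (fun (s : PySem.Dict Int Int × Int) k => (s.1.insert k s.2, s.2 + cnt.getD k 0))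
    (PySem.Dict.empty, 0)).1
  let n : Int := PySem.List.len world
  world.foldl (fun out m =>
    let v := m.2 + n - 2 * less.getD m.1 0 - cnt.getD m.1 0
    out ++ [(m.1 + v, v)]) []

-- ===== PRECONDITION & SPEC =====
def Spec_step_1d (world : List (Int × Int)) (out : List (Int × Int)) : Prop := out = step_1d_alt world
instance (world : List (Int × Int)) (out : List (Int × Int)) : Decidable (Spec_step_1d world out) := by unfold Spec_step_1d; infer_instance

-- ===== CLAIM (what is proved, stated in full; the proofs are below) =====
def Claim_equal_step_1d : Prop := ∀ (world : List (Int × Int)), Dom_step_1d world → Spec_step_1d world (step_1d world)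

-- ===== LEMMAS AND PROOFS =====

-- A's inner gravity sum over the raw position list, as (#greater) − (#less)
lemma sum_unitDiff (xs : List Int) (x : Int) :
    (xs.map (fun y => pvUnitDiff y x)).sum
      = (xs.countP (fun y => decide (x < y)) : Int) - (xs.countP (fun y => decide (y < x)) : Int) := by
  induction xs with
  | nil => simp
  | cons y t ih =>
    simp only [List.map_cons, List.sum_cons, List.countP_cons, ih]
    show pvUnitDiff y x + _ = _
    unfold pvUnitDiff
    rcases lt_trichotomy x y with h | h | h <;> simp [h, not_lt.mpr h.le] <;> omega

-- the three position classes (above, below, equal) partition the list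
lemma countP_three (xs : List Int) (x : Int) :
    xs.countP (fun y => decide (x < y)) + xs.countP (fun y => decide (y < x)) + xs.count x = xs.length := by
  induction xs with
  | nil => simp
  | cons y t ih =>
    simp only [List.countP_cons, List.count_cons, List.length_cons]
    rcases lt_trichotomy x y with h | h | h
    · simp [h, not_lt.mpr h.le, (ne_of_lt h).symm]; omega
    · subst h; simp; omega
    · simp [h, not_lt.mpr h.le, (ne_of_lt h)]; omega

-- sum of 0/1 indicators over a Nodup list
lemma sum_indicator (F : List Int) (y : Int) (hnd : F.Nodup) :
    (F.map (fun k => if k = y then (1 : Int) else 0)).sum = if y ∈ F then (1 : Int) else 0 := by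
  induction F with
  | nil => simp
  | cons a t ih =>
    simp only [List.nodup_cons] at hnd
    by_cases hy : a = y
    · subst hy
      simp [hnd.1, ih hnd.2]
    · simp only [List.map_cons, List.sum_cons, if_neg hy, zero_add, List.mem_cons]
      rw [ih hnd.2]
      simp [Ne.symm hy]

-- counting the elements below x via per-value counts over any Nodup list covering xs
lemma sum_count_filter (xs : List Int) (x : Int) (S : List Int)
    (hnd : S.Nodup) (hmem : ∀ y ∈ xs, y ∈ S) :
    ((S.filter (fun k => decide (k < x))).map (fun k => (xs.count k : Int))).sum
      = (xs.countP (fun y => decide (y < x)) : Int) := by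
  induction xs with
  | nil => simp
  | cons y t ih =>
    have hy : y ∈ S := hmem y (by simp)
    have ht : ∀ z ∈ t, z ∈ S := fun z hz => hmem z (by simp [hz])
    have hF : (S.filter (fun k => decide (k < x))).Nodup := hnd.filter _
    have step : (S.filter (fun k => decide (k < x))).map (fun k => ((y :: t).count k : Int))
        = (S.filter (fun k => decide (k < x))).map
            (fun k => (t.count k : Int) + (if k = y then 1 else 0)) := by
      apply List.map_congr_left
      intro k _
      rcases eq_or_ne k y with h | h
      · simp [h]
      · simp [h, h.symm]
    rw [step, List.sum_map_add, ih ht, sum_indicator _ _ hF, List.countP_cons]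
    by_cases h : y < x <;> simp [h, List.mem_filter, hy]

-- the prefix-sum loop does not touch keys it never sees
lemma prefix_fold_not_mem (sl : List Int) (c : Int → Int) (d : PySem.Dict Int Int) (a x : Int)
    (hx : x ∉ sl) :
    ((sl.foldl (fun (s : PySem.Dict Int Int × Int) k => (s.1.insert k s.2, s.2 + c k)) (d, a)).1).getD x 0
      = d.getD x 0 := by
  induction sl generalizing d a with
  | nil => rfl
  | cons h t ih =>
    simp only [List.mem_cons, not_or] at hx
    rw [List.foldl_cons, ih _ _ hx.2, PySem.Dict.getD_insert_of_ne]
    exact hx.1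

-- the prefix-sum loop: looking up x yields the sum of c over the keys below x
lemma prefix_fold_mem (sl : List Int) (c : Int → Int) (d : PySem.Dict Int Int) (a x : Int)
    (hx : x ∈ sl) (hp : sl.Pairwise (· < ·)) :
    ((sl.foldl (fun (s : PySem.Dict Int Int × Int) k => (s.1.insert k s.2, s.2 + c k)) (d, a)).1).getD x 0
      = a + ((sl.filter (fun k => decide (k < x))).map c).sum := by
  induction sl generalizing d a with
  | nil => simp at hx
  | cons h t ih =>
    rw [List.pairwise_cons] at hp
    rw [List.foldl_cons]
    rcases List.mem_cons.mp hx with rfl | hxt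
    · have hnt : x ∉ t := fun hmem => lt_irrefl x (hp.1 x hmem)
      rw [prefix_fold_not_mem _ _ _ _ _ hnt, PySem.Dict.getD_insert_self]
      have hfil : t.filter (fun k => decide (k < x)) = [] := by
        apply List.filter_eq_nil_iff.mpr
        intro k hk
        simp only [decide_eq_true_eq]
        exact fun hlt => lt_irrefl k (hlt.trans (hp.1 k hk))
      simp [hfil]
    · have hhx : h < x := hp.1 x hxt
      rw [ih _ _ hxt hp.2]
      simp [hhx]
      ring

-- B's counter over world is the multiplicity of each position
lemma cnt_getD (world : List (Int × Int)) (v : Int) :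
    (world.foldl (fun d m => d.insert m.1 (d.getD m.1 0 + 1))
        (PySem.Dict.empty : PySem.Dict Int Int)).getD v 0
      = ((world.map (·.1)).count v : Int) := by
  have h := List.foldl_map (f := fun p : Int × Int => p.1)
    (g := fun (d : PySem.Dict Int Int) x => d.insert x (d.getD x 0 + 1)) (l := world)
    (init := (PySem.Dict.empty : PySem.Dict Int Int))
  rw [← h, PySem.Dict.getD_foldl_insert_add_one]
  simp

-- B's counter keys are the distinct positions in first-occurrence order
lemma cnt_keys (world : List (Int × Int)) :
    (world.foldl (fun d m => d.insert m.1 (d.getD m.1 0 + 1))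
        (PySem.Dict.empty : PySem.Dict Int Int)).keys
      = PySem.Set.ofList (world.map (·.1)) := by
  rw [PySem.Dict.keys_foldl_insert_key]
  simp [PySem.Set.update, PySem.Set.ofList_eq_foldl]

-- ===== VERDICT (by name: the statement is the Claim_ definition above) =====
theorem step_1d_spec : Claim_equal_step_1d := by
  intro world _
  unfold Spec_step_1d
  simp only [step_1d, step_1d_alt, cnt_keys, PySem.List.len_eq,
    PySem.List.foldl_append_singleton_eq_map, List.nil_append]
  apply List.map_congr_left
  intro m hm
  have hxmem : m.1 ∈ world.map (·.1) := List.mem_map_of_mem hm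
  -- A's inner loop, as a difference of counts
  have hA : world.foldl (fun dv t => dv + pvUnitDiff t.1 m.1) 0
      = ((world.map (·.1)).countP (fun y => decide (m.1 < y)) : Int)
        - ((world.map (·.1)).countP (fun y => decide (y < m.1)) : Int) := by
    rw [PySem.List.foldl_add (g := fun t : Int × Int => pvUnitDiff t.1 m.1), zero_add]
    rw [show world.map (fun t : Int × Int => pvUnitDiff t.1 m.1)
          = (world.map (·.1)).map (fun y => pvUnitDiff y m.1) by rw [List.map_map]; rfl]
    exact sum_unitDiff _ _
  -- B's prefix-sum lookup, as the count of the strictly smaller positions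
  have hsl := PySem.List.sorted_ofList_pairwise_lt (world.map (·.1))
  have hmemsl : ∀ y ∈ world.map (·.1),
      y ∈ PySem.List.sorted (PySem.Set.ofList (world.map (·.1))) (fun x => x) false := by
    intro y hy
    rw [PySem.List.mem_sorted]
    exact (PySem.Set.mem_ofList _ _).mpr hy
  have hB : ((PySem.List.sorted (PySem.Set.ofList (world.map (·.1))) (fun x => x) false).foldl
      (fun (s : PySem.Dict Int Int × Int) k =>
        (s.1.insert k s.2,
         s.2 + (world.foldl (fun d m => d.insert m.1 (d.getD m.1 0 + 1))
                  (PySem.Dict.empty : PySem.Dict Int Int)).getD k 0))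
      (PySem.Dict.empty, 0)).1.getD m.1 0
      = ((world.map (·.1)).countP (fun y => decide (y < m.1)) : Int) := by
    rw [prefix_fold_mem _ _ _ _ _ (hmemsl m.1 hxmem) hsl, zero_add]
    rw [List.map_congr_left (fun k _ => cnt_getD world k)]
    exact sum_count_filter _ _ _ ((hsl.imp ne_of_lt)) hmemsl
  have hcnt := cnt_getD world m.1
  have h3 := countP_three (world.map (·.1)) m.1
  have hlen : (world.map (·.1)).length = world.length := by simp
  simp only [hA, hB, hcnt, Prod.mk.injEq]
  constructor <;> omega
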